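-- pv_equiv track=rewrite | github.com/gems-uff/sbcr | sbcr.py | get_first_index_before_position
-- ===== SOURCE A (Python) =====
-- def get_first_index_before_position(candidate, position, side):
--     first_index_before = -1
--     if position > 0:
--         for element in candidate[position-1::-1]:
--             element_side = element[0]
--             element_index = element[1]
--             if element_side == side:
--                 first_index_before = element_index
--                 break
--     return first_index_before
-- ===== SOURCE B (Python) =====
-- def get_first_index_before_position(candidate, position, side):
--     result = -1
--     if position > 0:
--         for element in candidate[:position]:
--             if element[0] == side:
--                 result = element[1]
--     return result
-- ===== Notes on version B (the rewrite author's own statement) =====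
-- stated objective: alternative
-- what changed: Replaces the backward scan over the reversed slice with an early break by a forward pass over candidate[:position] that keeps overwriting the result with the latest match (last forward match = first backward match).
import Mathlib
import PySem

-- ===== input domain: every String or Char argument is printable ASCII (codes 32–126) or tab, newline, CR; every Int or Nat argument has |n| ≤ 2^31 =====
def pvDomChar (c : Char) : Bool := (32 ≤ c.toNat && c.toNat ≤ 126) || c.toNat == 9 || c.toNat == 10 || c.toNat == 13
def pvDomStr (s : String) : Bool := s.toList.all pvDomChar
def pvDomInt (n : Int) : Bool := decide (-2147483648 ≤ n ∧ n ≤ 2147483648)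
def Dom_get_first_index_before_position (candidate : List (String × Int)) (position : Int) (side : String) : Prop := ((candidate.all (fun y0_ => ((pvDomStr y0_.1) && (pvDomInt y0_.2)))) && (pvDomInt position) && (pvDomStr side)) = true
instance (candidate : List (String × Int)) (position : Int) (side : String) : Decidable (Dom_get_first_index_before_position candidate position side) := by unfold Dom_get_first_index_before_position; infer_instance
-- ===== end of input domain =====

-- B differs from A only in traversal strategy (forward last-match vs backward first-match); return values agree everywhere.

-- ===== PORT A =====
-- A's for-loop with break over candidate[position-1::-1]: stop at the first matching side.
def aLoop (l : List (String × Int)) (side : String) (acc : Int) : Int :=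
  match l with
  | [] => acc
  | e :: rest => if e.1 == side then e.2 else aLoop rest side acc

def get_first_index_before_position (candidate : List (String × Int)) (position : Int) (side : String) : Int :=
  if position > 0 then
    -- candidate[position-1::-1]; step -1 never raises, so getD [] is never the fallback
    aLoop ((PySem.List.slice? candidate (some (position - 1)) none (-1)).getD []) side (-1)
  else (-1)

-- ===== PORT B =====
def get_first_index_before_position_alt (candidate : List (String × Int)) (position : Int) (side : String) : Int :=
  if position > 0 then
    (PySem.List.slice candidate none (some position)).foldl
      (fun r e => if e.1 == side then e.2 else r) (-1)
  else (-1)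

-- ===== PRECONDITION & SPEC =====
def Spec_get_first_index_before_position (candidate : List (String × Int)) (position : Int) (side : String) (out : Int) : Prop := out = get_first_index_before_position_alt candidate position side
instance (candidate : List (String × Int)) (position : Int) (side : String) (out : Int) : Decidable (Spec_get_first_index_before_position candidate position side out) := by unfold Spec_get_first_index_before_position; infer_instance

-- ===== CLAIM (what is proved, stated in full; the proofs are below) =====
def Claim_equal_get_first_index_before_position : Prop := ∀ (candidate : List (String × Int)) (position : Int) (side : String), Dom_get_first_index_before_position candidate position side → Spec_get_first_index_before_position candidate position side (get_first_index_before_position candidate position side)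

-- ===== LEMMAS AND PROOFS =====

theorem aLoop_append (u v : List (String × Int)) (s : String) (acc : Int) :
    aLoop (u ++ v) s acc = aLoop u s (aLoop v s acc) := by
  induction u with
  | nil => rfl
  | cons e rest ih => simp [aLoop, ih]

theorem aLoop_reverse_foldl (l : List (String × Int)) (s : String) (acc : Int) :
    aLoop l.reverse s acc = l.foldl (fun r e => if e.1 == s then e.2 else r) acc := by
  induction l generalizing acc with
  | nil => rfl
  | cons e rest ih =>
    simp only [List.reverse_cons, aLoop_append, List.foldl_cons, aLoop]
    exact ih _

theorem filterMap_desc {α : Type} (xs : List α) (s : Nat) (h : s < xs.length) :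
    (List.range (s+1)).filterMap (fun k => xs[s - k]?) = (xs.take (s+1)).reverse := by
  induction s with
  | zero =>
    match xs, h with
    | x :: xs, _ => simp [List.range_succ]
  | succ n ih =>
    rw [List.range_succ_eq_map]
    simp only [List.filterMap_cons, List.filterMap_map]
    have h' : n < xs.length := by omega
    have := ih h'
    have heq : (fun k => xs[n + 1 - (k + 1)]?) = (fun k => xs[n - k]?) := by
      funext k; congr 1; omega
    simp only [Function.comp_def]
    rw [show (fun k => xs[n + 1 - (k + 1)]?) = (fun k => xs[n - k]?) from heq] at *
    rw [this]
    have hn : n + 1 - 0 = n + 1 := rfl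
    rw [hn, List.getElem?_eq_getElem h]
    have htk : (List.take (n+1+1) xs).reverse = xs[n+1] :: (List.take (n+1) xs).reverse := by
      rw [List.take_add_one, List.getElem?_eq_getElem h]; simp
    rw [htk]

theorem slice_rev {α : Type} (c : List α) (p : Int) (hp : 0 < p) :
    PySem.List.slice? c (some (p - 1)) none (-1) = some ((c.take p.toNat).reverse) := by
  simp only [PySem.List.slice?, PySem.List.sliceIndices]
  norm_num
  have hp1 : ¬ p < 1 := by omega
  simp only [if_neg hp1]
  by_cases hn : c.length = 0
  · have hc : c = [] := List.length_eq_zero_iff.mp hn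
    subst hc
    have : ¬ ((-1:Int) < min (p - 1) ((([] : List α).length : Int) - 1)) := by
      simp
    rw [if_neg this]
    simp
  · have hn' : 0 < c.length := Nat.pos_of_ne_zero hn
    have hs0 : 0 ≤ min (p - 1) ((c.length : Int) - 1) := by omega
    obtain ⟨sn, hsn⟩ : ∃ sn : Nat, min (p - 1) ((c.length : Int) - 1) = (sn : Int) :=
      ⟨(min (p - 1) ((c.length : Int) - 1)).toNat, (Int.toNat_of_nonneg hs0).symm⟩
    rw [hsn]
    have hcond : (-1:Int) < (sn : Int) := by omega
    rw [if_pos hcond]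
    have hct : ((sn:Int) + 1).toNat = sn + 1 := by omega
    rw [hct]
    have harg : (fun x : Nat => getElem? c ((sn:Int) + -(x:Int)).toNat) = (fun x : Nat => getElem? c (sn - x)) := by
      funext x; congr 1; omega
    rw [harg]
    have hsl : sn < c.length := by omega
    rw [filterMap_desc c sn hsl]
    congr 1
    rw [List.take_eq_take_iff]
    omega

theorem get_first_index_before_position_spec : Claim_equal_get_first_index_before_position := by
  intro c p s _
  unfold Spec_get_first_index_before_position
  unfold get_first_index_before_position get_first_index_before_position_alt
  by_cases hp : p > 0
  · simp only [if_pos hp]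
    rw [slice_rev c p hp, Option.getD_some, aLoop_reverse_foldl,
      PySem.List.slice_to c (le_of_lt hp)]
  · simp [hp]
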